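-- pv_equiv track=rewrite | github.com/unitealfa/DMS | core/component/table_extraction/table_extraction_lib.py | _infer_detected_columns_from_rows
-- ===== SOURCE A (Python) =====
-- from typing import Any, Dict, List, Optional, Tuple
--
-- def _infer_detected_columns_from_rows(rows: List[Dict[str, Any]]) -> List[str]:
--     cols = set()
--     for row in rows:
--         if not isinstance(row, dict):
--             continue
--         if row.get("reference"):
--             cols.add("reference")
--         if row.get("product"):
--             cols.add("product")
--         if row.get("quantity"):
--             cols.add("quantity")
--         if row.get("unit_price"):
--             cols.add("unit_price")
--         if row.get("total") or row.get("total_ht") or row.get("total_ttc"):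
--             cols.add("total")
--     return sorted(cols)
-- ===== SOURCE B (Python) =====
-- def _infer_detected_columns_from_rows(rows):
--     cols = set()
--     if any(isinstance(r, dict) and r.get("reference") for r in rows):
--         cols.add("reference")
--     if any(isinstance(r, dict) and r.get("product") for r in rows):
--         cols.add("product")
--     if any(isinstance(r, dict) and r.get("quantity") for r in rows):
--         cols.add("quantity")
--     if any(isinstance(r, dict) and r.get("unit_price") for r in rows):
--         cols.add("unit_price")
--     if any(isinstance(r, dict) and (r.get("total") or r.get("total_ht") or r.get("total_ttc")) for r in rows):
--         cols.add("total")
--     return sorted(cols)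
-- ===== Notes on version B (the rewrite author's own statement) =====
-- stated objective: simpler
-- what changed: Row-oriented accumulation (one pass over rows, five membership tests per row into a growing set) is transposed to column-oriented: one any(...) scan over the rows per output column, then sorted of the at-most-five collected names.
import Mathlib
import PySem

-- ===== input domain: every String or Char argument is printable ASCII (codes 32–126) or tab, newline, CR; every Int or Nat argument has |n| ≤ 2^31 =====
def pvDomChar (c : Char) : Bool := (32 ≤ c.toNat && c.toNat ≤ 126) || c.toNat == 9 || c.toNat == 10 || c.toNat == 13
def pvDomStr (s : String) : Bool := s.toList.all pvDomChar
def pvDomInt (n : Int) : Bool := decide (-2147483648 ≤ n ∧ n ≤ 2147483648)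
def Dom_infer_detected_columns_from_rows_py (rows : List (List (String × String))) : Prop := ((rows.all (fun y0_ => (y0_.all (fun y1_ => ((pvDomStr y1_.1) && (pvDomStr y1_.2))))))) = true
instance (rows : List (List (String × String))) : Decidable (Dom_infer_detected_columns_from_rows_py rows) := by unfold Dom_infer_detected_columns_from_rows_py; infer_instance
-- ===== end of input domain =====

-- B transposes A's row-oriented set accumulation into one any(...) scan per output column; objective: simpler.


-- ===== PORT A =====
-- shared primitive: Python truthiness of row.get(k) (None and "" are falsy)
def pvTruthy (row : List (String × String)) (k : String) : Bool :=
  ((PySem.Dict.get? (PySem.Dict.mk row) k).getD "") != ""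

-- the body of A's 'for row in rows' loop (the isinstance guard is vacuous under the type convention)
def pvStepA (cols : PySem.Set String) (row : List (String × String)) : PySem.Set String :=
  let cols := if pvTruthy row "reference" then PySem.Set.add cols "reference" else cols
  let cols := if pvTruthy row "product" then PySem.Set.add cols "product" else cols
  let cols := if pvTruthy row "quantity" then PySem.Set.add cols "quantity" else cols
  let cols := if pvTruthy row "unit_price" then PySem.Set.add cols "unit_price" else cols
  if pvTruthy row "total" || pvTruthy row "total_ht" || pvTruthy row "total_ttc" then PySem.Set.add cols "total" else cols

def infer_detected_columns_from_rows_py (rows : List (List (String × String))) : List String :=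
  PySem.List.sorted (rows.foldl pvStepA PySem.Set.empty) (fun x => x) false

-- ===== PORT B =====
-- any(isinstance(r, dict) and r.get(k) for r in rows)
def pvHasCol (rows : List (List (String × String))) (k : String) : Bool :=
  rows.any (fun r => pvTruthy r k)

-- any(isinstance(r, dict) and (r.get("total") or r.get("total_ht") or r.get("total_ttc")) for r in rows)
def pvHasTot (rows : List (List (String × String))) : Bool :=
  rows.any (fun r => pvTruthy r "total" || pvTruthy r "total_ht" || pvTruthy r "total_ttc")

def infer_detected_columns_from_rows_py_alt (rows : List (List (String × String))) : List String :=
  let cols : PySem.Set String := PySem.Set.empty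
  let cols := if pvHasCol rows "reference" then PySem.Set.add cols "reference" else cols
  let cols := if pvHasCol rows "product" then PySem.Set.add cols "product" else cols
  let cols := if pvHasCol rows "quantity" then PySem.Set.add cols "quantity" else cols
  let cols := if pvHasCol rows "unit_price" then PySem.Set.add cols "unit_price" else cols
  let cols := if pvHasTot rows then PySem.Set.add cols "total" else cols
  PySem.List.sorted cols (fun x => x) false

-- ===== PRECONDITION & SPEC =====
def Spec_infer_detected_columns_from_rows_py (rows : List (List (String × String))) (out : List String) : Prop := out = infer_detected_columns_from_rows_py_alt rows
instance (rows : List (List (String × String))) (out : List String) : Decidable (Spec_infer_detected_columns_from_rows_py rows out) := by unfold Spec_infer_detected_columns_from_rows_py; infer_instance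

-- ===== CLAIM (what is proved, stated in full; the proofs are below) =====
def Claim_equal_infer_detected_columns_from_rows_py : Prop := ∀ (rows : List (List (String × String))), Dom_infer_detected_columns_from_rows_py rows → Spec_infer_detected_columns_from_rows_py rows (infer_detected_columns_from_rows_py rows)

-- ===== LEMMAS AND PROOFS =====

-- the common sorted target: the detected columns listed in ascending order
def pvT (rows : List (List (String × String))) : List String :=
  (if pvHasCol rows "product" then ["product"] else [])
  ++ (if pvHasCol rows "quantity" then ["quantity"] else [])
  ++ (if pvHasCol rows "reference" then ["reference"] else [])
  ++ (if pvHasTot rows then ["total"] else [])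
  ++ (if pvHasCol rows "unit_price" then ["unit_price"] else [])

lemma mem_condAdd (s : PySem.Set String) (c : Bool) (a x : String) :
    x ∈ (if c then PySem.Set.add s a else s) ↔ x ∈ s ∨ (c = true ∧ x = a) := by
  cases c <;> simp [PySem.Set.mem_add]

lemma nodup_condAdd (s : PySem.Set String) (c : Bool) (a : String)
    (hs : s.Nodup) : (if c then PySem.Set.add s a else s).Nodup := by
  cases c
  · exact hs
  · exact PySem.Set.nodup_add s a hs

lemma mem_condSingleton (c : Bool) (a x : String) :
    x ∈ (if c then [a] else ([] : List String)) ↔ c = true ∧ x = a := by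
  cases c <;> simp

-- the columns a single row contributes
def pvCols (row : List (String × String)) (x : String) : Prop :=
  (pvTruthy row "reference" = true ∧ x = "reference") ∨
  (pvTruthy row "product" = true ∧ x = "product") ∨
  (pvTruthy row "quantity" = true ∧ x = "quantity") ∨
  (pvTruthy row "unit_price" = true ∧ x = "unit_price") ∨
  ((pvTruthy row "total" || pvTruthy row "total_ht" || pvTruthy row "total_ttc") = true ∧ x = "total")

lemma mem_stepA (s : PySem.Set String) (row : List (String × String)) (x : String) :
    x ∈ pvStepA s row ↔ x ∈ s ∨ pvCols row x := by
  simp only [pvStepA, mem_condAdd, pvCols]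
  tauto

lemma mem_foldA (rows : List (List (String × String))) (s : PySem.Set String) (x : String) :
    x ∈ rows.foldl pvStepA s ↔ x ∈ s ∨ ∃ r ∈ rows, pvCols r x := by
  induction rows generalizing s with
  | nil => simp
  | cons r rs ih =>
    rw [List.foldl_cons, ih, mem_stepA]
    simp only [List.exists_mem_cons_iff]
    tauto

lemma mem_T (rows : List (List (String × String))) (x : String) :
    x ∈ pvT rows ↔ ∃ r ∈ rows, pvCols r x := by
  simp only [pvT, List.mem_append, mem_condSingleton]
  simp only [pvHasCol, pvHasTot, List.any_eq_true]
  constructor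
  · rintro ((((⟨⟨r, hr, hp⟩, hx⟩ | ⟨⟨r, hr, hp⟩, hx⟩) | ⟨⟨r, hr, hp⟩, hx⟩) |
        ⟨⟨r, hr, hp⟩, hx⟩) | ⟨⟨r, hr, hp⟩, hx⟩) <;>
      exact ⟨r, hr, by subst hx; simp only [pvCols]; tauto⟩
  · rintro ⟨r, hr, hc⟩
    simp only [pvCols] at hc
    rcases hc with ⟨hp, hx⟩ | ⟨hp, hx⟩ | ⟨hp, hx⟩ | ⟨hp, hx⟩ | ⟨hp, hx⟩ <;> subst hx
    · exact Or.inl (Or.inl (Or.inr ⟨⟨r, hr, hp⟩, rfl⟩))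
    · exact Or.inl (Or.inl (Or.inl (Or.inl ⟨⟨r, hr, hp⟩, rfl⟩)))
    · exact Or.inl (Or.inl (Or.inl (Or.inr ⟨⟨r, hr, hp⟩, rfl⟩)))
    · exact Or.inr ⟨⟨r, hr, hp⟩, rfl⟩
    · exact Or.inl (Or.inr ⟨⟨r, hr, hp⟩, rfl⟩)

lemma nodup_stepA (s : PySem.Set String) (row : List (String × String))
    (hs : s.Nodup) : (pvStepA s row).Nodup := by
  simp only [pvStepA]
  apply nodup_condAdd
  apply nodup_condAdd
  apply nodup_condAdd
  apply nodup_condAdd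
  exact nodup_condAdd _ _ _ hs

lemma nodup_foldA (rows : List (List (String × String))) (s : PySem.Set String)
    (hs : s.Nodup) : (rows.foldl pvStepA s).Nodup := by
  induction rows generalizing s with
  | nil => exact hs
  | cons r rs ih => exact ih _ (nodup_stepA s r hs)

lemma nodupT (rows : List (List (String × String))) : (pvT rows).Nodup := by
  unfold pvT
  split_ifs <;> decide

lemma pairwiseT (rows : List (List (String × String))) :
    (pvT rows).Pairwise (fun a b => (fun x : String => x) a < (fun x : String => x) b) := by
  unfold pvT
  split_ifs <;> simp [List.pairwise_cons, String.lt_iff_toList_lt] <;> decide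

lemma A_eq_T (rows : List (List (String × String))) :
    infer_detected_columns_from_rows_py rows = pvT rows := by
  unfold infer_detected_columns_from_rows_py
  refine PySem.List.sorted_eq_of_perm_of_pairwise_lt _ _ _ ?_ (pairwiseT rows)
  refine (List.perm_ext_iff_of_nodup (nodupT rows) (nodup_foldA rows _ List.nodup_nil)).mpr ?_
  intro x
  rw [mem_T, mem_foldA]
  simp

lemma B_eq_T (rows : List (List (String × String))) :
    infer_detected_columns_from_rows_py_alt rows = pvT rows := by
  simp only [infer_detected_columns_from_rows_py_alt]
  refine PySem.List.sorted_eq_of_perm_of_pairwise_lt _ _ _ ?_ (pairwiseT rows)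
  refine (List.perm_ext_iff_of_nodup (nodupT rows)
    (nodup_condAdd _ _ _ (nodup_condAdd _ _ _ (nodup_condAdd _ _ _ (nodup_condAdd _ _ _
      (nodup_condAdd _ _ _ List.nodup_nil)))))).mpr ?_
  intro x
  unfold pvT
  simp only [List.mem_append, mem_condSingleton, mem_condAdd, List.not_mem_nil]
  tauto

-- ===== VERDICT (by name: the statement is the Claim_ definition above) =====
theorem infer_detected_columns_from_rows_py_spec : Claim_equal_infer_detected_columns_from_rows_py := by
  intro rows _
  unfold Spec_infer_detected_columns_from_rows_py
  rw [A_eq_T, B_eq_T]
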